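-- pv_equiv track=rewrite | github.com/JangoBoogaloo/LeetCodeExcercise | leetcodePython/DynamicProgramming/dp_123.py | _getLeftProfits
-- ===== SOURCE A (Python) =====
-- from typing import List
--
-- def _getLeftProfits(prices: List[int]) -> List[int]:
--     length = len(prices)
--     leftMaxProfitAt = [0] * length
--     leftMinPrice = prices[0]
--     for day in range(1, length):
--         leftMaxProfitAt[day] = max(leftMaxProfitAt[day-1], prices[day] - leftMinPrice)
--         leftMinPrice = min(leftMinPrice, prices[day])
--     return leftMaxProfitAt
-- ===== SOURCE B (Python) =====
-- from typing import List
--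
-- def _getLeftProfits(prices: List[int]) -> List[int]:
--     # pass 1: minBefore[day] = min(prices[0..day-1]) for day >= 1 (index 0 unused)
--     minBefore = []
--     m = prices[0]
--     for p in prices:
--         minBefore.append(m)
--         m = min(m, p)
--     # pass 2: running maximum of the candidates prices[day] - minBefore[day], seeded at 0
--     result = [0]
--     best = 0
--     for day in range(1, len(prices)):
--         best = max(best, prices[day] - minBefore[day])
--         result.append(best)
--     return result
-- ===== Notes on version B (the rewrite author's own statement) =====
-- stated objective: alternative
-- what changed: A's single fused loop (simultaneously updating the running min and the profit array) is replaced by two separate passes: first build a prefix-minimum array minBefore, then fold the candidates prices[day]-minBefore[day] into a running maximum seeded at 0.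
import Mathlib
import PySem

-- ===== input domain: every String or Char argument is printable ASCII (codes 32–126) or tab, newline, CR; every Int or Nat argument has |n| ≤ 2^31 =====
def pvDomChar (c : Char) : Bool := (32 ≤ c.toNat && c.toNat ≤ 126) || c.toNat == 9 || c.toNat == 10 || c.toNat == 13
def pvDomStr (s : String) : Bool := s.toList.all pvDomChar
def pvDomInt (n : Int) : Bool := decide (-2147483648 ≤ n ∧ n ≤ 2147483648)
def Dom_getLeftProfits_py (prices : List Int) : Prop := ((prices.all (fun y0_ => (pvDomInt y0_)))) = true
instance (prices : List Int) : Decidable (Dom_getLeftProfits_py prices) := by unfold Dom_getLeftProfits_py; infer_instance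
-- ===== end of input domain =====

-- B replaces A's fused single loop by two passes: a prefix-minimum array, then a running
-- maximum over the candidates prices[day] - minBefore[day] (objective: alternative decomposition, same cost).

-- ===== PORT A =====
-- literal port of _getLeftProfits: array of zeros, one fused loop updating leftMaxProfitAt[day]
-- and leftMinPrice.  prices[day] / leftMaxProfitAt[day-1] are always in range for day in
-- range(1, len), so pyGetD is exact there; prices[0] needs prices ≠ [] (Pre_).
def getLeftProfits_py (prices : List Int) : List Int :=
  let length := prices.length
  let init : List Int × Int := (List.replicate length 0, PySem.List.pyGetD prices 0 0)
  let st := (PySem.List.pyRange 1 (length : Int) 1).foldl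
    (fun (s : List Int × Int) day =>
      (PySem.List.pySetD s.1 day
          (max (PySem.List.pyGetD s.1 (day - 1) 0) (PySem.List.pyGetD prices day 0 - s.2)),
       min s.2 (PySem.List.pyGetD prices day 0)))
    init
  st.1

-- ===== PORT B =====
-- literal port of Source B: pass 1 builds minBefore (minBefore[d] = min(prices[0..d-1]) for d ≥ 1),
-- pass 2 folds the candidates into a running maximum seeded at 0.
def getLeftProfits_py_alt (prices : List Int) : List Int :=
  let p1 := prices.foldl
    (fun (s : List Int × Int) p => (s.1 ++ [s.2], min s.2 p))
    (([] : List Int), PySem.List.pyGetD prices 0 0)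
  let minBefore := p1.1
  let st := (PySem.List.pyRange 1 (prices.length : Int) 1).foldl
    (fun (s : List Int × Int) day =>
      let best := max s.2 (PySem.List.pyGetD prices day 0 - PySem.List.pyGetD minBefore day 0)
      (s.1 ++ [best], best))
    (([0] : List Int), (0 : Int))
  st.1

-- ===== PRECONDITION & SPEC =====
-- Pre_ excludes the empty list, on which the Python A raises IndexError at prices[0].
def Pre_getLeftProfits_py (prices : List Int) : Prop := prices ≠ []
instance (prices : List Int) : Decidable (Pre_getLeftProfits_py prices) := by unfold Pre_getLeftProfits_py; infer_instance
def pvWitness_getLeftProfits_py : List Int := [3, 1, 4]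

def Spec_getLeftProfits_py (prices : List Int) (out : List Int) : Prop := out = getLeftProfits_py_alt prices
instance (prices : List Int) (out : List Int) : Decidable (Spec_getLeftProfits_py prices out) := by unfold Spec_getLeftProfits_py; infer_instance

-- ===== CLAIM (what is proved, stated in full; the proofs are below) =====
def Claim_equal_getLeftProfits_py : Prop := ∀ (prices : List Int), Dom_getLeftProfits_py prices → Pre_getLeftProfits_py prices → Spec_getLeftProfits_py prices (getLeftProfits_py prices)

-- ===== LEMMAS AND PROOFS =====

-- prefix minimum of the first k prices, seeded at prices[0]
def pvPrefMin (prices : List Int) (k : Nat) : Int :=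
  (prices.take k).foldl min (PySem.List.pyGetD prices 0 0)

-- the list B's first pass produces, as a recursion
def pvMinsOf (xs : List Int) (m : Int) : List Int :=
  match xs with
  | [] => []
  | p :: ps => m :: pvMinsOf ps (min m p)

theorem pvMinsOf_foldl (xs : List Int) (acc : List Int) (m : Int) :
    (xs.foldl (fun (s : List Int × Int) p => (s.1 ++ [s.2], min s.2 p)) (acc, m)).1
      = acc ++ pvMinsOf xs m := by
  induction xs generalizing acc m with
  | nil => simp [pvMinsOf]
  | cons p ps ih => simp [pvMinsOf, ih, List.append_assoc]

theorem pvMinsOf_length (xs : List Int) (m : Int) : (pvMinsOf xs m).length = xs.length := by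
  induction xs generalizing m with
  | nil => rfl
  | cons p ps ih => simp [pvMinsOf, ih]

theorem pvMinsOf_getD (xs : List Int) (m : Int) (d : Nat) (hd : d < xs.length) :
    (pvMinsOf xs m).getD d 0 = (xs.take d).foldl min m := by
  induction xs generalizing m d with
  | nil => simp at hd
  | cons p ps ih =>
    cases d with
    | zero => simp [pvMinsOf]
    | succ d =>
      simp only [pvMinsOf, List.getD_cons_succ, List.take_succ_cons, List.foldl_cons]
      exact ih (min m p) d (by simpa using hd)

theorem pvPrefMin_succ (prices : List Int) (k : Nat) (hk : k < prices.length) :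
    pvPrefMin prices (k + 1) = min (pvPrefMin prices k) (prices.getD k 0) := by
  unfold pvPrefMin
  rw [List.take_add_one, List.foldl_append]
  have : prices[k]? = some prices[k] := List.getElem?_eq_getElem hk
  simp [this, List.getD]

-- the two folds over range(1, k), as functions of k
def pvAfold (prices : List Int) (k : Nat) : List Int × Int :=
  (PySem.List.pyRange 1 (k : Int) 1).foldl
    (fun (s : List Int × Int) day =>
      (PySem.List.pySetD s.1 day
          (max (PySem.List.pyGetD s.1 (day - 1) 0) (PySem.List.pyGetD prices day 0 - s.2)),
       min s.2 (PySem.List.pyGetD prices day 0)))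
    (List.replicate prices.length 0, PySem.List.pyGetD prices 0 0)

def pvBfold (prices : List Int) (minBefore : List Int) (k : Nat) : List Int × Int :=
  (PySem.List.pyRange 1 (k : Int) 1).foldl
    (fun (s : List Int × Int) day =>
      let best := max s.2 (PySem.List.pyGetD prices day 0 - PySem.List.pyGetD minBefore day 0)
      (s.1 ++ [best], best))
    (([0] : List Int), (0 : Int))

theorem pv_set_at_length (res rest : List Int) (v : Int) :
    (res ++ rest).set res.length v = res ++ rest.set 0 v := by
  induction res with
  | nil => simp
  | cons a l ih => simp [ih]

theorem pv_invariant (prices : List Int) (hne : prices ≠ []) (k : Nat)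
    (hk1 : 1 ≤ k) (hkn : k ≤ prices.length) :
    let mins := pvMinsOf prices (PySem.List.pyGetD prices 0 0)
    let A := pvAfold prices k
    let B := pvBfold prices mins k
    B.1.length = k ∧ A.1 = B.1 ++ List.replicate (prices.length - k) 0 ∧
      A.2 = pvPrefMin prices k ∧ B.1.getD (k - 1) 0 = B.2 := by
  intro mins
  induction k with
  | zero => omega
  | succ k ih =>
    by_cases hk : k = 0
    · subst hk
      -- base case k+1 = 1: range(1,1) is empty
      simp only [pvAfold, pvBfold]
      obtain ⟨p, ps, rfl⟩ : ∃ p ps, prices = p :: ps := by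
        cases prices with
        | nil => exact absurd rfl hne
        | cons p ps => exact ⟨p, ps, rfl⟩
      refine ⟨rfl, ?_, ?_, rfl⟩
      · simp [List.replicate_succ]
      · simp [pvPrefMin, PySem.List.pyGetD]
    · have hk1' : 1 ≤ k := by omega
      have hkn' : k ≤ prices.length := by omega
      obtain ⟨hlen, harr, hm, hbest⟩ := ih hk1' hkn'
      have hkltn : k < prices.length := by omega
      -- split the range at k
      have hsplit : PySem.List.pyRange 1 ((k + 1 : Nat) : Int) 1
          = PySem.List.pyRange 1 (k : Int) 1 ++ [(k : Int)] := by
        have := PySem.List.pyRange_one_succ_right (a := 1) (b := (k : Int))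
          (by exact_mod_cast hk1')
        exact_mod_cast this
      have hstepA : pvAfold prices (k + 1) =
          (let s := pvAfold prices k
           (PySem.List.pySetD s.1 (k : Int)
              (max (PySem.List.pyGetD s.1 ((k : Int) - 1) 0)
                   (PySem.List.pyGetD prices (k : Int) 0 - s.2)),
            min s.2 (PySem.List.pyGetD prices (k : Int) 0))) := by
        simp only [pvAfold, hsplit, List.foldl_append, List.foldl_cons, List.foldl_nil]
      have hstepB : pvBfold prices mins (k + 1) =
          (let s := pvBfold prices mins k
           let best := max s.2 (PySem.List.pyGetD prices (k : Int) 0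
                                 - PySem.List.pyGetD mins (k : Int) 0)
           (s.1 ++ [best], best)) := by
        simp only [pvBfold, hsplit, List.foldl_append, List.foldl_cons, List.foldl_nil]
      set s := pvBfold prices mins k with hs
      -- index facts
      have hminsLen : mins.length = prices.length := pvMinsOf_length _ _
      have hminsGet : PySem.List.pyGetD mins (k : Int) 0 = pvPrefMin prices k := by
        rw [PySem.List.pyGetD_natCast]
        exact pvMinsOf_getD prices (PySem.List.pyGetD prices 0 0) k hkltn
      have hpricesGet : PySem.List.pyGetD prices (k : Int) 0 = prices.getD k 0 := by
        rw [PySem.List.pyGetD_natCast]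
      -- A's read of arr[k-1]
      have hidx : ((k : Int) - 1) = ((k - 1 : Nat) : Int) := by omega
      have hgetArr : PySem.List.pyGetD (pvAfold prices k).1 ((k : Int) - 1) 0 = s.2 := by
        rw [hidx, PySem.List.pyGetD_natCast, harr, List.getD_append _ _ _ _ (by omega)]
        exact hbest
      -- the new best is the same on both sides
      set best := max s.2 (prices.getD k 0 - pvPrefMin prices k) with hbestdef
      -- A's write
      have hwrite : (pvAfold prices (k + 1)).1 = s.1 ++ [best] ++ List.replicate (prices.length - (k + 1)) 0 := by
        rw [hstepA]
        simp only [PySem.List.pySetD_natCast, hgetArr, hpricesGet, hm]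
        rw [harr]
        have hrep : List.replicate (prices.length - k) (0 : Int)
            = 0 :: List.replicate (prices.length - (k + 1)) 0 := by
          have : prices.length - k = (prices.length - (k + 1)) + 1 := by omega
          rw [this, List.replicate_succ]
        calc (s.1 ++ List.replicate (prices.length - k) 0).set k best
            = (s.1 ++ List.replicate (prices.length - k) 0).set s.1.length best := by rw [hlen]
          _ = s.1 ++ (List.replicate (prices.length - k) 0).set 0 best := pv_set_at_length _ _ _
          _ = s.1 ++ [best] ++ List.replicate (prices.length - (k + 1)) 0 := by
              rw [hrep]; simp
      refine ⟨?_, ?_, ?_, ?_⟩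
      · rw [hstepB]; simp [hlen]
      · rw [hwrite, hstepB]; simp [hminsGet, hpricesGet, hbestdef, List.getD]
      · rw [hstepA]
        simp only [hm, hpricesGet]
        exact (pvPrefMin_succ prices k hkltn).symm
      · rw [hstepB]
        simp only [hminsGet, hpricesGet]
        have : (s.1 ++ [max s.2 (prices.getD k 0 - pvPrefMin prices k)]).getD (k + 1 - 1) 0
            = max s.2 (prices.getD k 0 - pvPrefMin prices k) := by
          have : k + 1 - 1 = s.1.length := by omega
          rw [this]
          simp
        simpa using this

-- ===== VERDICT (by name: the statement is the Claim_ definition above) =====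
theorem getLeftProfits_py_spec : Claim_equal_getLeftProfits_py := by
  intro prices _ hne
  unfold Spec_getLeftProfits_py getLeftProfits_py getLeftProfits_py_alt
  have hlen : 1 ≤ prices.length := by
    cases prices with
    | nil => exact absurd rfl hne
    | cons _ _ => simp
  obtain ⟨_, harr, _, _⟩ := pv_invariant prices hne prices.length hlen (le_refl _)
  have hmins : (prices.foldl (fun (s : List Int × Int) p => (s.1 ++ [s.2], min s.2 p))
      (([] : List Int), PySem.List.pyGetD prices 0 0)).1
      = pvMinsOf prices (PySem.List.pyGetD prices 0 0) := by
    simpa using pvMinsOf_foldl prices [] (PySem.List.pyGetD prices 0 0)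
  simp only [pvAfold, pvBfold] at harr
  simp only [hmins]
  rw [harr]
  simp
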